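-- pv_equiv track=rewrite | github.com/PongDev/2110101-COMP-PROG | Grader/09_MoreDC_34/09_MoreDC_34.py | pattern6
-- ===== SOURCE A (Python) =====
-- def pattern6(N):
--     r=[[0 for j in range(N)] for i in range(N)]
--
--     count=1
--     for i in range(N):
--         for j in (range(N-i) if i%2==0 else range(N-i-1,-1,-1)):
--             r[j][j+i]=count
--             count+=1
--     return r
-- ===== SOURCE B (Python) =====
-- def pattern6(N):
--     r = []
--     for row in range(N):
--         line = [0] * row
--         for col in range(row, N):
--             i = col - row
--             c0 = 1 + i * N - i * (i - 1) // 2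
--             line.append(c0 + (row if i % 2 == 0 else N - i - 1 - row))
--         r.append(line)
--     return r
-- ===== Notes on version B (the rewrite author's own statement) =====
-- stated objective: simpler
-- what changed: Each cell is computed directly by a closed-form formula over its diagonal index (base count plus position, reversed on odd diagonals) instead of snaking a mutable counter along diagonals of a pre-allocated matrix.
import Mathlib
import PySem

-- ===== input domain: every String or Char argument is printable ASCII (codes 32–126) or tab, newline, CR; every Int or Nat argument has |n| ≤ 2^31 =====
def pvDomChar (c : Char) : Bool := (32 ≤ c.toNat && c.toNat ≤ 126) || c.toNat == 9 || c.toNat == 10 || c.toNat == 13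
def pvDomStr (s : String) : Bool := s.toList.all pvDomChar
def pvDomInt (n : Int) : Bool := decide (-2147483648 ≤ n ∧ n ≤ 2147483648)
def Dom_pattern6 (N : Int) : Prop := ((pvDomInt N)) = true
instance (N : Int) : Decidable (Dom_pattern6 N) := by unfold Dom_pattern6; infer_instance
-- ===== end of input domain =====

-- B computes each cell by a closed-form formula over its diagonal instead of snaking a counter; objective: simpler.


-- ===== PORT A =====
-- the body of A's outer loop: snake along diagonal i, assigning the running counter
def stepA (N : Int) (st : List (List Int) × Int) (i : Int) : List (List Int) × Int :=
  (if PySem.Int.mod i 2 == 0 then PySem.List.pyRange 0 (N - i) 1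
   else PySem.List.pyRange (N - i - 1) (-1) (-1)).foldl
    (fun st j =>
      (PySem.List.pySetD st.1 j (PySem.List.pySetD (PySem.List.pyGetD st.1 j []) (j + i) st.2),
       st.2 + 1))
    st

def pattern6 (N : Int) : List (List Int) :=
  let r := (PySem.List.pyRange 0 N 1).map (fun _ => (PySem.List.pyRange 0 N 1).map (fun _ => (0 : Int)))
  ((PySem.List.pyRange 0 N 1).foldl (stepA N) (r, 1)).1

-- ===== PORT B =====
-- one row: zeros up to the diagonal, then the closed-form value of each cell
def rowB (N row : Int) : List Int :=
  (PySem.List.pyRange row N 1).foldl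
    (fun line col =>
      let i := col - row
      let c0 := 1 + i * N - PySem.Int.floordiv (i * (i - 1)) 2
      line ++ [c0 + (if PySem.Int.mod i 2 == 0 then row else N - i - 1 - row)])
    (PySem.List.pyRepeat [0] row)

def pattern6_alt (N : Int) : List (List Int) :=
  (PySem.List.pyRange 0 N 1).foldl (fun r row => r ++ [rowB N row]) []

-- ===== PRECONDITION & SPEC =====
def Spec_pattern6 (N : Int) (out : List (List Int)) : Prop := out = pattern6_alt N
instance (N : Int) (out : List (List Int)) : Decidable (Spec_pattern6 N out) := by unfold Spec_pattern6; infer_instance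

-- ===== CLAIM (what is proved, stated in full; the proofs are below) =====
def Claim_equal_pattern6 : Prop := ∀ (N : Int), Dom_pattern6 N → Spec_pattern6 N (pattern6 N)

-- ===== LEMMAS AND PROOFS =====

-- the closed-form cell value (proof-side view of B's formula, 0 below the diagonal)
def cellB (N row col : Int) : Int :=
  if col < row then 0
  else
    let i := col - row
    let c0 := 1 + i * N - PySem.Int.floordiv (i * (i - 1)) 2
    c0 + (if PySem.Int.mod i 2 == 0 then row else N - i - 1 - row)

-- a matrix generated by a cell function
def mat (N : Int) (f : Int → Int → Int) : List (List Int) :=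
  (PySem.List.pyRange 0 N 1).map (fun r => (PySem.List.pyRange 0 N 1).map (fun c => f r c))

-- the counter value when diagonal k starts
def cnt (N k : Int) : Int := 1 + k * N - PySem.Int.floordiv (k * (k - 1)) 2

theorem mat_congr (N : Int) (f g : Int → Int → Int)
    (h : ∀ r c, 0 ≤ r → r < N → 0 ≤ c → c < N → f r c = g r c) : mat N f = mat N g := by
  unfold mat
  refine List.map_congr_left (fun r hr => ?_)
  rw [PySem.List.mem_pyRange_one] at hr
  refine List.map_congr_left (fun c hc => ?_)
  rw [PySem.List.mem_pyRange_one] at hc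
  exact h r c hr.1 hr.2 hc.1 hc.2

theorem set_map_pyRange {α : Type} (n : Int) (g : Int → α) (k : Int) (v : α)
    (h0 : 0 ≤ k) (hk : k < n) :
    ((PySem.List.pyRange 0 n 1).map g).set k.toNat v
      = (PySem.List.pyRange 0 n 1).map (fun x => if x = k then v else g x) := by
  apply List.ext_getElem
  · simp
  · intro m h1 h2
    simp only [List.length_set, List.length_map, PySem.List.length_pyRange_one] at h1
    have hm : ((PySem.List.pyRange 0 n 1).map g).length = (n - 0).toNat := by simp
    rw [List.getElem_set, List.getElem_map, List.getElem_map]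
    simp only [PySem.List.getElem_pyRange_one]
    split_ifs with h3 h4 <;> first | rfl | omega

theorem mat_set (N : Int) (f : Int → Int → Int) (r c v : Int)
    (hr0 : 0 ≤ r) (hrN : r < N) (hc0 : 0 ≤ c) (hcN : c < N) :
    PySem.List.pySetD (mat N f) r
        (PySem.List.pySetD (PySem.List.pyGetD (mat N f) r []) c v)
      = mat N (fun r' c' => if r' = r ∧ c' = c then v else f r' c') := by
  unfold mat
  rw [PySem.List.pyGetD_map_pyRange_of_nonneg _ _ _ _ hr0 hrN,
      PySem.List.pySetD_of_nonneg _ _ hc0,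
      set_map_pyRange N _ c v hc0 hcN,
      PySem.List.pySetD_of_nonneg _ _ hr0,
      set_map_pyRange N _ r _ hr0 hrN]
  refine List.map_congr_left (fun r' _ => ?_)
  by_cases h : r' = r
  · subst h
    simp only [if_pos rfl]
    refine List.map_congr_left (fun c' _ => ?_)
    by_cases hc : c' = c <;> simp [hc]
  · simp only [if_neg h]
    refine List.map_congr_left (fun c' _ => ?_)
    simp [h]


-- even diagonal: j runs a, a+1, …, L-1 (L = N - i)
theorem inner_even (N i : Int) (hi0 : 0 ≤ i) (hiN : i < N) :
    ∀ (m : Nat) (a : Int), 0 ≤ a → a + m = N - i →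
    ∀ (g : Int → Int → Int) (c : Int),
    (PySem.List.pyRange a (N - i) 1).foldl
        (fun st j =>
          (PySem.List.pySetD st.1 j (PySem.List.pySetD (PySem.List.pyGetD st.1 j []) (j + i) st.2),
           st.2 + 1))
        (mat N g, c)
      = (mat N (fun r c' => if a ≤ r ∧ r < N - i ∧ c' = r + i then c + (r - a) else g r c'),
         c + (N - i - a)) := by
  intro m
  induction m with
  | zero =>
      intro a ha0 ham g c
      rw [PySem.List.pyRange_one_eq_nil (by omega)]
      simp only [List.foldl_nil]
      refine Prod.ext (mat_congr N _ _ ?_) (by dsimp only; omega)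
      intro r c' _ _ _ _
      rw [if_neg (by omega)]
  | succ m ih =>
      intro a ha0 ham g c
      rw [PySem.List.pyRange_one_cons (by omega), List.foldl_cons]
      have hset := mat_set N g a (a + i) c ha0 (by omega) (by omega) (by omega)
      simp only [hset]
      rw [ih (a + 1) (by omega) (by omega)]
      refine Prod.ext (mat_congr N _ _ ?_) (by dsimp only; omega)
      intro r c' _ _ _ _
      by_cases h1 : a + 1 ≤ r ∧ r < N - i ∧ c' = r + i
      · rw [if_pos h1, if_pos ⟨by omega, h1.2⟩]; omega
      · rw [if_neg h1]
        by_cases h2 : r = a ∧ c' = a + i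
        · rw [if_pos h2, if_pos ⟨by omega, by omega, by omega⟩]; omega
        · rw [if_neg h2, if_neg (by omega)]

-- odd diagonal: j runs a, a-1, …, 0
theorem inner_odd (N i : Int) (hi0 : 0 ≤ i) (hiN : i < N) :
    ∀ (m : Nat) (a : Int), a < N - i → a + 1 = m →
    ∀ (g : Int → Int → Int) (c : Int),
    (PySem.List.pyRange a (-1) (-1)).foldl
        (fun st j =>
          (PySem.List.pySetD st.1 j (PySem.List.pySetD (PySem.List.pyGetD st.1 j []) (j + i) st.2),
           st.2 + 1))
        (mat N g, c)
      = (mat N (fun r c' => if 0 ≤ r ∧ r ≤ a ∧ c' = r + i then c + (a - r) else g r c'),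
         c + (a + 1)) := by
  intro m
  induction m with
  | zero =>
      intro a haN ham g c
      rw [PySem.List.pyRange_neg_one_eq_nil (by omega)]
      simp only [List.foldl_nil]
      refine Prod.ext (mat_congr N _ _ ?_) (by dsimp only; omega)
      intro r c' _ _ _ _
      rw [if_neg (by omega)]
  | succ m ih =>
      intro a haN ham g c
      rw [PySem.List.pyRange_neg_one_cons (by omega), List.foldl_cons]
      have ha0 : 0 ≤ a := by omega
      have hset := mat_set N g a (a + i) c ha0 (by omega) (by omega) (by omega)
      simp only [hset]
      rw [ih (a - 1) (by omega) (by omega)]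
      refine Prod.ext (mat_congr N _ _ ?_) (by dsimp only; omega)
      intro r c' _ _ _ _
      by_cases h1 : 0 ≤ r ∧ r ≤ a - 1 ∧ c' = r + i
      · rw [if_pos h1, if_pos ⟨h1.1, by omega, h1.2.2⟩]; omega
      · rw [if_neg h1]
        by_cases h2 : r = a ∧ c' = a + i
        · rw [if_pos h2, if_pos ⟨by omega, by omega, by omega⟩]; omega
        · rw [if_neg h2, if_neg (by omega)]

theorem cnt_succ (N : Int) (k : Int) (hk : 0 ≤ k) : cnt N k + (N - k) = cnt N (k + 1) := by
  obtain ⟨p, hp⟩ : Even (k * (k - 1)) := Int.even_mul_pred_self k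
  obtain ⟨q, hq⟩ : Even ((k + 1) * k) := by rw [mul_comm]; exact Int.even_mul_succ_self k
  unfold cnt
  rw [PySem.Int.floordiv_eq_ediv_of_pos (by omega), PySem.Int.floordiv_eq_ediv_of_pos (by omega)]
  have h1 : k * (k - 1) = 2 * p := by omega
  have h2 : (k + 1) * (k + 1 - 1) = 2 * q := by ring_nf; ring_nf at hq; omega
  rw [h1, h2, Int.mul_ediv_cancel_left _ (by omega), Int.mul_ediv_cancel_left _ (by omega)]
  nlinarith [hp, hq]

theorem outer (N : Int) : ∀ (k : Nat), (k : Int) ≤ N →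
    (PySem.List.pyRange 0 (k : Int) 1).foldl (stepA N) (mat N (fun _ _ => 0), 1)
      = (mat N (fun r c => if r ≤ c ∧ c - r < (k : Int) then cellB N r c else 0), cnt N k) := by
  intro k
  induction k with
  | zero =>
      intro _
      rw [PySem.List.pyRange_one_eq_nil (by omega)]
      simp only [List.foldl_nil]
      refine Prod.ext (mat_congr N _ _ ?_) (by dsimp only; norm_num [cnt, PySem.Int.floordiv])
      intro r c _ _ _ _
      rw [if_neg (by omega)]
  | succ k ih =>
      intro hk
      push_cast
      rw [PySem.List.pyRange_one_succ_right (by omega), List.foldl_append, List.foldl_cons,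
          List.foldl_nil]
      have hk' : (k : Int) ≤ N := by omega
      rw [ih hk']
      have hi0 : (0 : Int) ≤ (k : Int) := by omega
      have hiN : (k : Int) < N := by omega
      unfold stepA
      by_cases hpar : PySem.Int.mod (k : Int) 2 == 0
      · rw [if_pos hpar]
        rw [inner_even N k hi0 hiN (N - k).toNat 0 le_rfl (by omega)]
        refine Prod.ext (mat_congr N _ _ ?_)
          (by dsimp only; rw [← cnt_succ N k hi0]; ring)
        intro r c hr0 hrN hc0 hcN
        by_cases h1 : 0 ≤ r ∧ r < N - (k : Int) ∧ c = r + (k : Int)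
        · rw [if_pos h1, if_pos (by omega)]
          have hcr : c - r = (k : Int) := by omega
          simp only [cellB, cnt]
          rw [if_neg (by omega), hcr, if_pos hpar]
          ring
        · rw [if_neg h1]
          by_cases h2 : r ≤ c ∧ c - r < (k : Int)
          · rw [if_pos h2, if_pos (by omega)]
          · rw [if_neg h2, if_neg (by omega)]
      · rw [if_neg hpar]
        rw [inner_odd N k hi0 hiN (N - k).toNat (N - k - 1) (by omega) (by omega)]
        refine Prod.ext ?_ ?_
        · refine mat_congr N _ _ ?_
          intro r c hr0 hrN hc0 hcN
          by_cases h1 : 0 ≤ r ∧ r ≤ N - (k : Int) - 1 ∧ c = r + (k : Int)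
          · rw [if_pos h1, if_pos (by omega)]
            have hcr : c - r = (k : Int) := by omega
            simp only [cellB, cnt]
            rw [if_neg (by omega), hcr, if_neg hpar]
          · rw [if_neg h1]
            by_cases h2 : r ≤ c ∧ c - r < (k : Int)
            · rw [if_pos h2, if_pos (by omega)]
            · rw [if_neg h2, if_neg (by omega)]
        · dsimp only
          rw [← cnt_succ N k hi0]
          ring

theorem alt_eq_mat (N : Int) : pattern6_alt N = mat N (fun r c => cellB N r c) := by
  unfold pattern6_alt mat
  rw [PySem.List.foldl_append_singleton_eq_map]
  simp only [List.nil_append]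
  refine List.map_congr_left (fun row hrow => ?_)
  rw [PySem.List.mem_pyRange_one] at hrow
  unfold rowB
  rw [PySem.List.foldl_append_singleton_eq_map, PySem.List.pyRepeat_singleton,
      PySem.List.pyRange_one_append 0 row N (by omega) (by omega), List.map_append]
  congr 1
  · have hzero : (PySem.List.pyRange 0 row 1).map (fun c => cellB N row c)
        = (PySem.List.pyRange 0 row 1).map (fun _ => (0 : Int)) := by
      refine List.map_congr_left (fun c hc => ?_)
      rw [PySem.List.mem_pyRange_one] at hc
      unfold cellB
      rw [if_pos (by omega)]
    rw [hzero, List.map_const', PySem.List.length_pyRange_one]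
    norm_num
  · refine (List.map_congr_left (fun c hc => ?_)).symm
    rw [PySem.List.mem_pyRange_one] at hc
    unfold cellB
    rw [if_neg (by omega)]

-- ===== VERDICT (by name: the statement is the Claim_ definition above) =====
theorem pattern6_spec : Claim_equal_pattern6 := by
  intro N _
  unfold Spec_pattern6 pattern6
  rw [alt_eq_mat]
  by_cases hN : N ≤ 0
  · rw [PySem.List.pyRange_one_eq_nil (by omega)]
    simp [mat, PySem.List.pyRange_one_eq_nil (show N ≤ 0 from hN)]
  · have hN0 : 0 ≤ N := by omega
    have hcast : ((N.toNat : Int)) = N := by omega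
    have h := outer N N.toNat (by omega)
    rw [hcast] at h
    show ((PySem.List.pyRange 0 N 1).foldl (stepA N)
        ((PySem.List.pyRange 0 N 1).map (fun _ => (PySem.List.pyRange 0 N 1).map (fun _ => (0:Int))), 1)).1 = _
    have hmat : (PySem.List.pyRange 0 N 1).map
        (fun _ => (PySem.List.pyRange 0 N 1).map (fun _ => (0:Int))) = mat N (fun _ _ => 0) := rfl
    rw [hmat, h]
    refine mat_congr N _ _ ?_
    intro r c hr0 hrN hc0 hcN
    by_cases h2 : r ≤ c ∧ c - r < N
    · rw [if_pos h2]
    · rw [if_neg h2]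
      unfold cellB
      rw [if_pos (by omega)]
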